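-- pv_equiv track=rewrite | github.com/TingLu-MATH/Haar-state-project | Modules.py | term_find_s
-- ===== SOURCE A (Python) =====
-- dict_comul={
--     'a': (('a','a'),('b','d'),('c','g')),
--     'b': (('a','b'),('b','e'),('c','h')),
--     'c': (('a','c'),('b','f'),('c','k')),
--     'd': (('d','a'),('e','d'),('f','g')),
--     'e': (('d','b'),('e','e'),('f','h')),
--     'f': (('d','c'),('e','f'),('f','k')),
--     'g': (('g','a'),('h','d'),('k','g')),
--     'h': (('g','b'),('h','e'),('k','h')),
--     'k': (('g','c'),('h','f'),('k','k'))
-- }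
--
-- def find_component_s(n):
--     h=[]
--     h1=[]
--     h2=[]
--     h3=[]
--     for i in range(n):
--         l1=[]
--         for j in range(n):
--             if j==i:
--                 l1.append('b')
--             else:
--                 l1.append('a')
--         h1.append(l1)
--     for j in range(n-1):
--         for k in range(j+1,n):
--             l21=[]
--             for i in range(n):
--                 if i==j:
--                     l21.append('f')
--                 elif i==k:
--                     l21.append('d')
--                 else:
--                     l21.append('e')
--             h2.append(l21)
--     for j in range(n-1):
--         for k in range(j+1,n):
--             l21=[]
--             for i in range(n):
--                 if i==j:
--                     l21.append('d')
--                 elif i==k: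
--                     l21.append('f')
--                 else:
--                     l21.append('e')
--             h2.append(l21)
--     for i in range(n):
--         l3=[]
--         for j in range(n):
--             if j==i:
--                 l3.append('h')
--             else:
--                 l3.append('k')
--         h3.append(l3)
--     for item1 in h1:
--         for item2 in h2:
--             for item3 in h3:
--                 a=''
--                 for p in range(n):
--                      a+=item1[p]+item2[p]+item3[p]
--                 h.append(a)
--     return h
--
-- def term_find_s(string1):
--     l=list(string1)
--     n=len(l)
--     h=find_component_s(int((n+1)/3))
--     t=[]
--     for item in h:
--         tt=''
--         ll=list(item)
--         for i in range(n):
--             for tu in dict_comul[l[i]]: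
--                 if tu[0]==ll[i]:
--                     tt+=tu[1]
--                     break
--         t.append(tt)
--     final=[]
--     for j in range(len(h)):
--         final.append([h[j],t[j]])
--     return final
-- ===== SOURCE B (Python) =====
-- dict_comul={
--     'a': (('a','a'),('b','d'),('c','g')),
--     'b': (('a','b'),('b','e'),('c','h')),
--     'c': (('a','c'),('b','f'),('c','k')),
--     'd': (('d','a'),('e','d'),('f','g')),
--     'e': (('d','b'),('e','e'),('f','h')),
--     'f': (('d','c'),('e','f'),('f','k')),
--     'g': (('g','a'),('h','d'),('k','g')),
--     'h': (('g','b'),('h','e'),('k','h')),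
--     'k': (('g','c'),('h','f'),('k','k'))
-- }
--
-- def term_find_s(string1):
--     # fused single enumeration: build each component string and its comul partner together
--     l = list(string1)
--     n = len(l)
--     m = (n + 1) // 3
--     final = []
--     for i1 in range(m):
--         for cj, ck in (('f', 'd'), ('d', 'f')):
--             for j in range(m - 1):
--                 for k in range(j + 1, m):
--                     for i3 in range(m):
--                         h_chars = []
--                         for p in range(m):
--                             h_chars.append('b' if p == i1 else 'a')
--                             h_chars.append(cj if p == j else (ck if p == k else 'e'))
--                             h_chars.append('h' if p == i3 else 'k')
--                         tt = ''
--                         for i in range(n):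
--                             for tu in dict_comul[l[i]]:
--                                 if tu[0] == h_chars[i]:
--                                     tt += tu[1]
--                                     break
--                         final.append([''.join(h_chars), tt])
--     return final
-- ===== Notes on version B (the rewrite author's own statement) =====
-- stated objective: alternative
-- what changed: A generates the three phase-component lists, cross-products them into strings, translates them in a second pass and zips by index; B is one fused enumeration over (b-position, f/d-order, pair (j,k), h-position) that constructs each component string and its comultiplication partner together and appends the pair directly.
import Mathlib
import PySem

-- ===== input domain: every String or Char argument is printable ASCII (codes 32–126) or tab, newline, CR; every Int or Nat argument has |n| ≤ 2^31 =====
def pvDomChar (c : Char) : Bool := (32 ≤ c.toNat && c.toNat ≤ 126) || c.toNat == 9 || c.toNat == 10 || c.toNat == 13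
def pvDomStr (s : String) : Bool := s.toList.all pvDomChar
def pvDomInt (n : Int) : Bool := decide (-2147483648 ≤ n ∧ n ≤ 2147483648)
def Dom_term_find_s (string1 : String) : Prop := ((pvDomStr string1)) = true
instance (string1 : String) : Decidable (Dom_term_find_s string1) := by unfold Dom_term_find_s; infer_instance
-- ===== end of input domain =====

-- B fuses the three component-generation phases and the translation pass of A into one
-- integrated enumeration over (i1, (cj,ck), j, k, i3); objective: alternative decomposition.

-- dict_comul (shared module constant; both Pythons use the identical tuple-scan lookup,
-- ported once as comulLookup)
def dictComul : PySem.Dict Char (List (Char × Char)) := PySem.Dict.ofList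
  [('a', [('a','a'),('b','d'),('c','g')]),
   ('b', [('a','b'),('b','e'),('c','h')]),
   ('c', [('a','c'),('b','f'),('c','k')]),
   ('d', [('d','a'),('e','d'),('f','g')]),
   ('e', [('d','b'),('e','e'),('f','h')]),
   ('f', [('d','c'),('e','f'),('f','k')]),
   ('g', [('g','a'),('h','d'),('k','g')]),
   ('h', [('g','b'),('h','e'),('k','h')]),
   ('k', [('g','c'),('h','f'),('k','k')])]

-- the inner "for i in range(n): for tu in dict_comul[l[i]]: if tu[0]==ll[i]: tt+=tu[1]; break"
-- loop, textually identical in Source A and Source B; missing key / out-of-range index (where Python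
-- raises, outside Pre_) contribute the default, harmlessly on Pre_.
def comulLookup (l : List Char) (n : Nat) (ll : List Char) : List Char :=
  (List.range n).foldl (fun tt i =>
    tt ++ (match (PySem.Dict.getD dictComul (l.getD i ' ') []).find? (fun tu => tu.1 == ll.getD i ' ') with
           | some tu => [tu.2]
           | none => [])) []

-- ===== PORT A =====
-- (strings under construction are carried as List Char; String.ofList only at the returned value)
def findComponentS (n : Nat) : List (List Char) :=
  let h1 := (List.range n).map (fun i => (List.range n).map (fun j => if j = i then 'b' else 'a'))
  let h2 := ((List.range (n-1)).flatMap (fun j => (List.range' (j+1) (n-(j+1))).map (fun k =>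
              (List.range n).map (fun i => if i = j then 'f' else if i = k then 'd' else 'e'))))
            ++ ((List.range (n-1)).flatMap (fun j => (List.range' (j+1) (n-(j+1))).map (fun k =>
              (List.range n).map (fun i => if i = j then 'd' else if i = k then 'f' else 'e'))))
  let h3 := (List.range n).map (fun i => (List.range n).map (fun j => if j = i then 'h' else 'k'))
  h1.flatMap (fun item1 => h2.flatMap (fun item2 => h3.map (fun item3 =>
    (List.range n).foldl (fun a p => a ++ [item1.getD p ' ', item2.getD p ' ', item3.getD p ' ']) [])))

def term_find_s (string1 : String) : List (List String) :=
  let l := string1.toList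
  let n := l.length
  let h := findComponentS ((n+1)/3)
  let t := h.map (fun item => comulLookup l n item)
  (List.range h.length).map (fun j => [String.ofList (h.getD j []), String.ofList (t.getD j [])])

-- ===== PORT B =====
def term_find_s_alt (string1 : String) : List (List String) :=
  let l := string1.toList
  let n := l.length
  let m := (n+1)/3
  (List.range m).flatMap (fun i1 =>
    [('f','d'),('d','f')].flatMap (fun cs =>
      (List.range (m-1)).flatMap (fun j =>
        (List.range' (j+1) (m-(j+1))).flatMap (fun k =>
          (List.range m).map (fun i3 =>
            let hchars := (List.range m).flatMap (fun p =>
              [if p = i1 then 'b' else 'a',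
               if p = j then cs.1 else if p = k then cs.2 else 'e',
               if p = i3 then 'h' else 'k'])
            [String.ofList hchars, String.ofList (comulLookup l n hchars)])))))

-- ===== PRECONDITION & SPEC =====
-- Pre_ is exactly where the Python A returns: for length ≥ 5 it raises KeyError on a character
-- outside dict_comul's keys and IndexError when len % 3 == 1 (component strings too short);
-- for length < 5 the result is [] and A returns on any string.
def Pre_term_find_s (string1 : String) : Prop :=
  string1.toList.length < 5 ∨
    (string1.toList.length % 3 ≠ 1 ∧
      ∀ c ∈ string1.toList, c ∈ (['a','b','c','d','e','f','g','h','k'] : List Char))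
instance (string1 : String) : Decidable (Pre_term_find_s string1) := by
  unfold Pre_term_find_s; infer_instance
def pvWitness_term_find_s : String := "ab"

def Spec_term_find_s (string1 : String) (out : List (List String)) : Prop := out = term_find_s_alt string1
instance (string1 : String) (out : List (List String)) : Decidable (Spec_term_find_s string1 out) := by unfold Spec_term_find_s; infer_instance

-- ===== CLAIM (what is proved, stated in full; the proofs are below) =====
def Claim_equal_term_find_s : Prop := ∀ (string1 : String), Dom_term_find_s string1 → Pre_term_find_s string1 → Spec_term_find_s string1 (term_find_s string1)

-- ===== LEMMAS AND PROOFS =====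

-- A builds t by a separate pass and zips it back by index; that equals mapping the pair
-- constructor over h directly.
theorem final_zip (h : List (List Char)) (f : List Char → List Char) :
    (List.range h.length).map (fun j => [String.ofList (h.getD j []), String.ofList ((h.map (fun c => f c)).getD j [])])
    = h.map (fun c => [String.ofList c, String.ofList (f c)]) := by
  apply List.ext_getElem
  · simp
  · intro j hj hj'
    simp only [List.getElem_map, List.getElem_range]
    rw [List.getD_eq_getElem _ _ (by simpa using hj'),
        List.getD_eq_getElem _ _ (by simpa using hj')]
    simp

-- the per-position interleave: A's index-and-append fold over the three phase rows equals
-- B's direct three-character emission, for indices inside range n.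
theorem interleave_eq (n i1 j k i3 : Nat) (c1 c2 : Char) :
    (List.range n).flatMap (fun p =>
        [((List.range n).map (fun q => if q = i1 then 'b' else 'a')).getD p ' ',
         ((List.range n).map (fun q => if q = j then c1 else if q = k then c2 else 'e')).getD p ' ',
         ((List.range n).map (fun q => if q = i3 then 'h' else 'k')).getD p ' '])
    = (List.range n).flatMap (fun p =>
        [if p = i1 then 'b' else 'a',
         if p = j then c1 else if p = k then c2 else 'e',
         if p = i3 then 'h' else 'k']) := by
  apply List.flatMap_congr
  intro p hp
  rw [PySem.List.getD_map_range _ _ _ _ (List.mem_range.mp hp),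
      PySem.List.getD_map_range _ _ _ _ (List.mem_range.mp hp),
      PySem.List.getD_map_range _ _ _ _ (List.mem_range.mp hp)]

-- ===== VERDICT (by name: the statement is the Claim_ definition above) =====
theorem term_find_s_spec : Claim_equal_term_find_s := by
  intro string1 _ _
  show term_find_s string1 = term_find_s_alt string1
  unfold term_find_s term_find_s_alt findComponentS
  rw [final_zip]
  simp only [PySem.List.foldl_append_eq_flatMap, List.nil_append, List.map_flatMap,
    List.flatMap_map, List.flatMap_append, List.map_append, List.flatMap_assoc,
    List.map_map, List.flatMap_cons, List.flatMap_nil, List.append_nil]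
  apply List.flatMap_congr
  intro i1 _
  congr 1 <;>
  · apply List.flatMap_congr
    intro j _
    apply List.flatMap_congr
    intro k _
    apply List.map_congr_left
    intro i3 _
    simp only [Function.comp_apply]
    rw [interleave_eq]
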